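-- pv_equiv track=rewrite | github.com/enzoofs/sunny | provider/decrypt.py | _megacloud_keygen
-- ===== SOURCE A (Python) =====
-- def _megacloud_keygen(megacloud_key, client_key):
--     temp_key = megacloud_key + client_key
--
--     hash_val = 0
--     for ch in temp_key:
--         hash_val = ord(ch) + hash_val * 31 + (hash_val << 7) - hash_val
--         hash_val &= 0xFFFFFFFFFFFFFFFF
--
--     xored = bytes([ord(c) ^ 247 for c in temp_key])
--
--     pivot = (hash_val % len(temp_key)) + 5
--     if pivot > len(xored):
--         pivot = pivot % len(xored)
--     shifted = xored[pivot:] + xored[:pivot]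
--
--     leaf_str = client_key[::-1]
--     shifted_str = shifted.decode("latin-1")
--
--     return_key = ""
--     for i in range(max(len(shifted_str), len(leaf_str))):
--         if i < len(shifted_str):
--             return_key += shifted_str[i]
--         if i < len(leaf_str):
--             return_key += leaf_str[i]
--
--     key_len = 96 + (hash_val % 33)
--     if key_len > len(return_key):
--         key_len = len(return_key)
--     return_key = return_key[:key_len]
--
--     normalized = "".join(chr((ord(c) % 95) + 32) for c in return_key)
--     return normalized
-- ===== SOURCE B (Python) =====
-- def _megacloud_keygen(megacloud_key, client_key):
--     temp_key = megacloud_key + client_key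
--     hash_val = 0
--     for ch in temp_key:
--         hash_val = ord(ch) + hash_val * 31 + (hash_val << 7) - hash_val
--         hash_val &= 0xFFFFFFFFFFFFFFFF
--     L = len(temp_key)
--     M = len(client_key)
--     pivot = (hash_val % L + 5) % L
--     key_len = min(96 + hash_val % 33, L + M)
--     out = []
--     for j in range(key_len):
--         if j < 2 * M:
--             if j % 2 == 0:
--                 x = ord(temp_key[(pivot + j // 2) % L]) ^ 247
--             else:
--                 x = ord(client_key[M - 1 - j // 2])
--         else:
--             x = ord(temp_key[(pivot + j - M) % L]) ^ 247
--         out.append(chr(x % 95 + 32))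
--     return "".join(out)
-- ===== Notes on version B (the rewrite author's own statement) =====
-- stated objective: faster
-- what changed: B keeps the hash loop but drops all intermediate byte/string constructions (xored, shifted, reversed leaf, interleaved return_key): it computes the final truncated length up front and emits each normalized output character directly by mapping its output index back through the interleave pattern and the pivot rotation.
import Mathlib
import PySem

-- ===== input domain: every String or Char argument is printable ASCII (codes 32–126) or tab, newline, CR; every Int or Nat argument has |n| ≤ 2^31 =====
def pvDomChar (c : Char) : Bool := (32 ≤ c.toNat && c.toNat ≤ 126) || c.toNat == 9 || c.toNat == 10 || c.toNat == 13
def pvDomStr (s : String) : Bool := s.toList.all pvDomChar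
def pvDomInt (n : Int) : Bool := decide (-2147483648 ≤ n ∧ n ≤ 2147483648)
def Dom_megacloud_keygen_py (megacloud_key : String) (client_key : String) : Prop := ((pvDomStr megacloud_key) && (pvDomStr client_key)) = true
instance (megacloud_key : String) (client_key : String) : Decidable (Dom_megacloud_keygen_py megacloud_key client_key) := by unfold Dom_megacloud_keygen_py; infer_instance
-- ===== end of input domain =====

-- B re-implements A's key derivation as a single index-mapped pass (no intermediate
-- xored/shifted/interleaved strings); equivalence of the return values is proved below.

-- ===== PORT A =====
-- shared hash step: hash_val = ord(ch) + hash_val*31 + (hash_val << 7) - hash_val; hash_val &= mask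
-- (this loop is identical in A and in B, which keeps it unchanged)
def pvHstep (h : Int) (c : Char) : Int :=
  PySem.Int.band ((c.toNat : Int) + h * 31 + (h <<< (7 : Nat)) - h) 0xFFFFFFFFFFFFFFFF

def megacloud_keygen_py (megacloud_key : String) (client_key : String) : String :=
  let temp_key : List Char := megacloud_key.toList ++ client_key.toList
  let hash_val : Int := temp_key.foldl pvHstep 0
  let xored : List Nat := temp_key.map (fun c => c.toNat ^^^ 247)          -- bytes([ord(c) ^ 247 …])
  let pivot0 : Int := PySem.Int.mod hash_val (temp_key.length : Int) + 5
  let pivot : Int := if pivot0 > (xored.length : Int) then PySem.Int.mod pivot0 (xored.length : Int) else pivot0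
  let shifted : List Nat := PySem.List.slice xored (some pivot) none ++ PySem.List.slice xored none (some pivot)
  let leaf_str : List Char := client_key.toList.reverse                    -- client_key[::-1]; PySem.List.slice?_none_none_neg_one
  let shifted_str : List Char := shifted.map Char.ofNat                    -- shifted.decode("latin-1")
  let return_key : List Char :=
    (PySem.List.pyRange 0 (max (shifted_str.length : Int) (leaf_str.length : Int)) 1).foldl
      (fun acc i =>
        let acc1 := if i < (shifted_str.length : Int) then acc ++ [PySem.List.pyGetD shifted_str i ' '] else acc
        if i < (leaf_str.length : Int) then acc1 ++ [PySem.List.pyGetD leaf_str i ' '] else acc1) []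
  let key_len0 : Int := 96 + PySem.Int.mod hash_val 33
  let key_len : Int := if key_len0 > (return_key.length : Int) then (return_key.length : Int) else key_len0
  let return_key2 : List Char := PySem.List.slice return_key none (some key_len)
  String.ofList (return_key2.map (fun c => Char.ofNat (c.toNat % 95 + 32)))

-- ===== PORT B =====
def megacloud_keygen_py_alt (megacloud_key : String) (client_key : String) : String :=
  let temp_key : List Char := megacloud_key.toList ++ client_key.toList
  let hash_val : Int := temp_key.foldl pvHstep 0
  let L : Nat := temp_key.length
  let M : Nat := client_key.toList.length
  let pivot : Nat := ((PySem.Int.mod hash_val (L : Int)).toNat + 5) % L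
  let key_len : Nat := min (96 + (PySem.Int.mod hash_val 33).toNat) (L + M)
  String.ofList ((List.range key_len).map (fun j =>
    let x : Nat :=
      if j < 2 * M then
        if j % 2 = 0 then (temp_key.getD ((pivot + j / 2) % L) ' ').toNat ^^^ 247
        else (client_key.toList.getD (M - 1 - j / 2) ' ').toNat
      else (temp_key.getD ((pivot + j - M) % L) ' ').toNat ^^^ 247
    Char.ofNat (x % 95 + 32)))

-- ===== PRECONDITION & SPEC =====
-- Pre_ excludes only the input with both strings empty, on which A raises ZeroDivisionError
-- at 'hash_val % len(temp_key)' (B's computation divides by the same length there).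
def Pre_megacloud_keygen_py (megacloud_key : String) (client_key : String) : Prop :=
  megacloud_key.toList ++ client_key.toList ≠ []
instance (megacloud_key : String) (client_key : String) : Decidable (Pre_megacloud_keygen_py megacloud_key client_key) := by unfold Pre_megacloud_keygen_py; infer_instance

def pvWitness_megacloud_keygen_py : String × String := ("mega", "client")

def Spec_megacloud_keygen_py (megacloud_key : String) (client_key : String) (out : String) : Prop := out = megacloud_keygen_py_alt megacloud_key client_key
instance (megacloud_key : String) (client_key : String) (out : String) : Decidable (Spec_megacloud_keygen_py megacloud_key client_key out) := by unfold Spec_megacloud_keygen_py; infer_instance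

-- ===== CLAIM (what is proved, stated in full; the proofs are below) =====
def Claim_equal_megacloud_keygen_py : Prop := ∀ (megacloud_key : String) (client_key : String), Dom_megacloud_keygen_py megacloud_key client_key → Pre_megacloud_keygen_py megacloud_key client_key → Spec_megacloud_keygen_py megacloud_key client_key (megacloud_keygen_py megacloud_key client_key)

-- ===== LEMMAS AND PROOFS =====

-- the hash accumulator never goes negative
lemma pvHstep_nonneg (h : Int) (c : Char) (hh : 0 ≤ h) : 0 ≤ pvHstep h c := by
  unfold pvHstep
  apply PySem.Int.band_nonneg_of_nonneg_left
  have h7 : h <<< (7 : Nat) = h * 128 := by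
    rw [Int.shiftLeft_eq]; norm_num
  have hc : (0 : Int) ≤ (c.toNat : Int) := by positivity
  omega

lemma pvHash_nonneg (l : List Char) : ∀ h : Int, 0 ≤ h → 0 ≤ l.foldl pvHstep h := by
  induction l with
  | nil => intro h hh; simpa using hh
  | cons c t ih => intro h hh; exact ih _ (pvHstep_nonneg h c hh)

-- a rotation xs[q:] + xs[:q] read off index-wise
lemma pvRotate {α : Type} (xs : List α) (d : α) (q : Nat) (hq : q ≤ xs.length) :
    xs.drop q ++ xs.take q =
      (List.range xs.length).map (fun i => xs.getD ((q + i) % xs.length) d) := by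
  apply List.ext_getElem
  · simp; omega
  intro i h1 h2
  have hiL : i < xs.length := by simpa using h2
  simp only [List.getElem_map, List.getElem_range]
  by_cases hc : i < xs.length - q
  · rw [List.getElem_append_left (by simpa using hc)]
    have e : (q + i) % xs.length = q + i := Nat.mod_eq_of_lt (by omega)
    rw [e, List.getD_eq_getElem _ _ (by omega)]
    simp [List.getElem_drop]
  · rw [List.getElem_append_right (by simpa using hc)]
    have e : (q + i) % xs.length = i - (xs.length - q) := by
      rw [Nat.mod_eq_sub_mod (by omega), Nat.mod_eq_of_lt (by omega)]
      omega
    rw [e, List.getD_eq_getElem _ _ (by omega)]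
    simp [List.getElem_take]

-- strict alternation a0 b0 a1 b1 … read off by output index
lemma pvInterleave2 {α : Type} (a b : Nat → α) (M : Nat) :
    (List.range M).flatMap (fun k => [a k, b k]) =
      (List.range (2 * M)).map (fun j => if j % 2 = 0 then a (j / 2) else b (j / 2)) := by
  induction M with
  | zero => simp
  | succ m ih =>
    rw [List.range_succ, List.flatMap_append, ih]
    rw [show 2 * (m + 1) = (2 * m + 1) + 1 by ring, List.range_succ, List.range_succ]
    have e1 : (2 * m) % 2 = 0 := by omega
    have e2 : (2 * m) / 2 = m := by omega
    have e3 : (2 * m + 1) % 2 = 1 := by omega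
    have e4 : (2 * m + 1) / 2 = m := by omega
    simp [e1, e2, e3, e4]

-- the full interleave (b exhausted after M items, M ≤ L) read off by output index
lemma pvInterleaveChar {α : Type} (a b : Nat → α) (M L : Nat) (h : M ≤ L) :
    (List.range L).flatMap (fun k => a k :: (if k < M then [b k] else [])) =
      (List.range (L + M)).map (fun j =>
        if j < 2 * M then (if j % 2 = 0 then a (j / 2) else b (j / 2)) else a (j - M)) := by
  rw [show L = M + (L - M) by omega, List.range_add, List.flatMap_append]
  have e1 : (List.range M).flatMap (fun k => a k :: (if k < M then [b k] else [])) =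
      (List.range M).flatMap (fun k => [a k, b k]) := by
    rw [List.flatMap_def, List.flatMap_def]
    congr 1
    apply List.map_congr_left
    intro k hk
    simp [List.mem_range.mp hk]
  have e2 : ((List.range (L - M)).map (fun x => M + x)).flatMap
        (fun k => a k :: (if k < M then [b k] else [])) =
      (List.range (L - M)).map (fun x => a (M + x)) := by
    rw [List.flatMap_map, List.flatMap_def]
    have : ∀ x ∈ List.range (L - M),
        (fun k => a k :: (if k < M then [b k] else [])) (M + x) = [a (M + x)] := by
      intro x hx
      simp [Nat.not_lt.mpr (Nat.le_add_right M x)]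
    rw [List.map_congr_left this, ← List.flatMap_def]
    induction List.range (L - M) with
    | nil => rfl
    | cons y ys ih => simp [List.flatMap_cons, ih]
  rw [e1, e2, pvInterleave2]
  rw [show M + (L - M) + M = 2 * M + (L - M) by omega, List.range_add, List.map_append,
    List.map_map]
  congr 1
  · apply List.map_congr_left
    intro j hj
    simp [List.mem_range.mp hj]
  · apply List.map_congr_left
    intro x hx
    have h1 : ¬ (2 * M + x < 2 * M) := by omega
    simp only [Function.comp_apply, h1, if_false]
    congr 1
    omega

-- A's accumulation loop over range(max(len,len)) as a map over output indices
lemma pvFoldlInterleave (S E : List Char) (h : E.length ≤ S.length) :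
    (PySem.List.pyRange 0 (max (S.length : Int) (E.length : Int)) 1).foldl
      (fun acc i =>
        let acc1 := if i < (S.length : Int) then acc ++ [PySem.List.pyGetD S i ' '] else acc
        if i < (E.length : Int) then acc1 ++ [PySem.List.pyGetD E i ' '] else acc1) [] =
      (List.range (S.length + E.length)).map (fun j =>
        if j < 2 * E.length then (if j % 2 = 0 then S.getD (j / 2) ' ' else E.getD (j / 2) ' ')
        else S.getD (j - E.length) ' ') := by
  have hmax : max (S.length : Int) (E.length : Int) = ((S.length : Nat) : Int) := by
    rw [← Nat.cast_max, Nat.max_eq_left h]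
  rw [hmax, PySem.List.pyRange_one]
  simp only [sub_zero, Int.toNat_natCast, List.foldl_map]
  rw [PySem.List.foldl_congr_mem _ _
      (fun acc k => acc ++ (S.getD k ' ' :: (if k < E.length then [E.getD k ' '] else []))) []
      ?_]
  · rw [PySem.List.foldl_append_eq_flatMap, List.nil_append,
      pvInterleaveChar (fun k => S.getD k ' ') (fun k => E.getD k ' ') E.length S.length h]
  · intro acc k hk
    have hkL : k < S.length := List.mem_range.mp hk
    by_cases hkM : k < E.length <;>
      simp [hkM, hkL, PySem.List.pyGetD_natCast, Nat.cast_lt, zero_add]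


-- pivot adjustment 'if pivot > len: pivot %= len' as a Nat-level conditional
lemma pvPivotEq (a n : Nat) :
    (if ((a : Int) + 5 > (n : Int)) then PySem.Int.mod ((a : Int) + 5) (n : Int) else (a : Int) + 5) =
      (((if n < a + 5 then (a + 5) % n else a + 5) : Nat) : Int) := by
  have e : ((a : Int) + 5) = ((a + 5 : Nat) : Int) := by push_cast; ring
  rw [e]
  by_cases hc : n < a + 5
  · rw [if_pos (by exact_mod_cast hc), if_pos hc, PySem.Int.mod_natCast]
  · rw [if_neg (by exact_mod_cast hc), if_neg hc]

-- key_len truncation 'if key_len > len: key_len = len' as min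
lemma pvKeyLenEq (b n : Nat) :
    (if ((96 : Int) + (b : Int) > (n : Int)) then (n : Int) else (96 : Int) + (b : Int)) =
      ((min (96 + b) n : Nat) : Int) := by
  have e : ((96 : Int) + (b : Int)) = ((96 + b : Nat) : Int) := by push_cast; ring
  rw [e]
  by_cases hc : n < 96 + b
  · rw [if_pos (by exact_mod_cast hc), show min (96 + b) n = n from by omega]
  · rw [if_neg (by exact_mod_cast hc), show min (96 + b) n = 96 + b from by omega]

-- the rotated xored byte string, read off index-wise through the pivot (mod len)
lemma pvShiftedEq (t : List Char) (q : Nat) (hL : 0 < t.length) (hq : q ≤ t.length) :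
    ((t.map (fun c : Char => c.toNat ^^^ 247)).drop q ++ (t.map (fun c : Char => c.toNat ^^^ 247)).take q).map Char.ofNat =
      (List.range t.length).map
        (fun i => Char.ofNat ((t.getD ((q % t.length + i) % t.length) ' ').toNat ^^^ 247)) := by
  rw [pvRotate (t.map (fun c : Char => c.toNat ^^^ 247)) 0 q (by simpa using hq), List.map_map]
  simp only [List.length_map]
  apply List.map_congr_left
  intro i hi
  have hiL : i < t.length := List.mem_range.mp hi
  simp only [Function.comp_apply]
  have e : (q + i) % t.length = (q % t.length + i) % t.length := by
    conv_lhs => rw [Nat.add_mod]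
    conv_rhs => rw [Nat.add_mod, Nat.mod_mod_of_dvd q dvd_rfl]
  rw [e]
  have hk : (q % t.length + i) % t.length < t.length := Nat.mod_lt _ hL
  rw [List.getD_eq_getElem _ _ (by simpa using hk), List.getElem_map,
    List.getD_eq_getElem _ _ hk]

-- a xored byte of a printable-ASCII string is < 256
lemma pvByteLt (t : List Char) (hsmall : ∀ x ∈ t, x.toNat ≤ 126) (k : Nat) :
    (t.getD k ' ').toNat ^^^ 247 < 256 := by
  have h1 : (t.getD k ' ').toNat ≤ 126 := by
    by_cases hk : k < t.length
    · rw [List.getD_eq_getElem _ _ hk]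
      exact hsmall _ (List.getElem_mem _)
    · rw [List.getD_eq_getElem?_getD, List.getElem?_eq_none (by omega)]
      decide
  have h2 : (t.getD k ' ').toNat < 2 ^ 8 := by omega
  have h3 : (247 : Nat) < 2 ^ 8 := by norm_num
  have := Nat.xor_lt_two_pow h2 h3
  omega

lemma pvToNatOfNat (b : Nat) (hb : b < 256) : (Char.ofNat b).toNat = b := by
  rw [Char.toNat_ofNat, if_pos (Or.inl (by omega))]

-- ===== VERDICT (by name: the statement is the Claim_ definition above) =====
theorem megacloud_keygen_py_spec : Claim_equal_megacloud_keygen_py := by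
  intro m c hdom hpre
  have hsmall : ∀ x ∈ m.toList ++ c.toList, x.toNat ≤ 126 := by
    intro x hx
    unfold Dom_megacloud_keygen_py pvDomStr at hdom
    rw [Bool.and_eq_true] at hdom
    have hx' : pvDomChar x = true := by
      rcases List.mem_append.mp hx with hx | hx
      · exact List.all_eq_true.mp hdom.1 x hx
      · exact List.all_eq_true.mp hdom.2 x hx
    unfold pvDomChar at hx'
    simp only [Bool.or_eq_true, Bool.and_eq_true, decide_eq_true_eq, beq_iff_eq] at hx'
    omega
  have hpre' : m.toList ++ c.toList ≠ [] := hpre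
  unfold Spec_megacloud_keygen_py
  simp only [megacloud_keygen_py, megacloud_keygen_py_alt]
  clear hdom hpre
  generalize hgk : m.toList = mk at *
  generalize hgc : c.toList = ck at *
  clear hgk hgc
  have hL0 : 0 < (mk ++ ck).length := by
    rcases Nat.eq_zero_or_pos (mk ++ ck).length with h0 | h0
    · exact absurd (List.length_eq_zero_iff.mp h0) hpre'
    · exact h0
  have hML : ck.length ≤ (mk ++ ck).length := by rw [List.length_append]; omega
  have hlen : (mk ++ ck).length = mk.length + ck.length := by simp
  set hv := (mk ++ ck).foldl pvHstep 0 with hhv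
  have h0 : 0 ≤ hv := pvHash_nonneg (mk ++ ck) 0 le_rfl
  set hn := hv.toNat with hhn
  rw [show hv = (hn : Int) from (Int.toNat_of_nonneg h0).symm]
  rw [show (33 : Int) = ((33 : Nat) : Int) from by norm_num]
  simp only [PySem.Int.mod_natCast, Int.toNat_natCast]
  rw [show ((mk ++ ck).map (fun c : Char => c.toNat ^^^ 247)).length = (mk ++ ck).length from by simp]
  rw [pvPivotEq]
  set q := (if (mk ++ ck).length < hn % (mk ++ ck).length + 5 then
      (hn % (mk ++ ck).length + 5) % (mk ++ ck).length else hn % (mk ++ ck).length + 5) with hqdef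
  have hqle : q ≤ (mk ++ ck).length := by
    rw [hqdef]; split_ifs with hc
    · exact (Nat.mod_lt _ hL0).le
    · omega
  have hqm : q % (mk ++ ck).length = (hn % (mk ++ ck).length + 5) % (mk ++ ck).length := by
    rw [hqdef]; split_ifs with hc
    · exact Nat.mod_mod_of_dvd _ dvd_rfl
    · rfl
  simp only [PySem.List.slice_from_natCast, PySem.List.slice_to_natCast]
  rw [pvShiftedEq (mk ++ ck) q hL0 hqle]
  simp only [hqm]
  rw [pvFoldlInterleave _ _ (by simp)]
  simp only [List.length_map, List.length_range, List.length_reverse]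
  rw [pvKeyLenEq]
  simp only [PySem.List.slice_to_natCast]
  rw [← List.map_take, List.take_range]
  rw [show min (min (96 + hn % 33) ((mk ++ ck).length + ck.length)) ((mk ++ ck).length + ck.length) =
      min (96 + hn % 33) ((mk ++ ck).length + ck.length) from by omega]
  rw [List.map_map]
  congr 1
  apply List.map_congr_left
  intro j hj
  have hj' : j < min (96 + hn % 33) ((mk ++ ck).length + ck.length) := List.mem_range.mp hj
  simp only [Function.comp_apply]
  by_cases h2 : j < 2 * ck.length
  · by_cases hpar : j % 2 = 0
    · simp only [if_pos h2, if_pos hpar]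
      rw [List.getD_eq_getElem _ _ (by simp; omega)]
      simp only [List.getElem_map, List.getElem_range]
      rw [pvToNatOfNat _ (pvByteLt (mk ++ ck) hsmall _)]
    · simp only [if_pos h2, if_neg hpar]
      rw [List.getD_eq_getElem _ _ (by simp; omega), List.getElem_reverse,
        List.getD_eq_getElem _ _ (by omega)]
  · obtain ⟨r, hr⟩ : ∃ r, j = ck.length + r := ⟨j - ck.length, by omega⟩
    subst hr
    simp only [if_neg h2, Nat.add_sub_cancel_left]
    rw [List.getD_eq_getElem _ _ (by simp; omega)]
    simp only [List.getElem_map, List.getElem_range]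
    rw [pvToNatOfNat _ (pvByteLt (mk ++ ck) hsmall _)]
    rw [show (hn % (mk ++ ck).length + 5) % (mk ++ ck).length + (ck.length + r) - ck.length =
        (hn % (mk ++ ck).length + 5) % (mk ++ ck).length + r from by omega]
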